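-- pv_equiv track=rewrite | github.com/epsalt/aoc2021 | day22.py | cube_difference
-- ===== SOURCE A (Python) =====
-- def line_int(a, b):
--     if (b[0] > a[1]) or (a[0] > b[1]):
--         return None
--
--     return max(a[0], b[0]), min(a[1], b[1])
--
-- def cube_difference(a, b):
--     cubes = []
--     xint = line_int(a[0], b[0])
--     yint = line_int(a[1], b[1])
--     zint = line_int(a[2], b[2])
--
--     # xint, all y, all z
--     cubes.append(((a[0][0], xint[0] - 1), a[1], a[2]))
--     cubes.append(((xint[1] + 1, a[0][1]), a[1], a[2]))
--
--     # xint, yint, all z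
--     cubes.append((xint, (a[1][0], yint[0] - 1), a[2]))
--     cubes.append((xint, (yint[1] + 1, a[1][1]), a[2]))
--
--     # zint, yint, zint
--     cubes.append((xint, yint, (a[2][0], zint[0] - 1)))
--     cubes.append((xint, yint, (zint[1] + 1, a[2][1])))
--
--     return [cube for cube in cubes if (all(cube[n][0] <= cube[n][1] for n in range(3)))]
-- ===== SOURCE B (Python) =====
-- def cube_difference(a, b):
--     if any(b[n][0] > a[n][1] or a[n][0] > b[n][1] for n in range(3)):
--         raise ValueError("cuboids do not overlap")
--
--     def go(i):
--         if i >= 3: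
--             return []
--         (al, ah), (bl, bh) = a[i], b[i]
--         core = (max(al, bl), min(ah, bh))
--         rest = tuple(a[j] for j in range(i + 1, 3))
--         out = []
--         for seg in ((al, bl - 1), (bh + 1, ah)):
--             cube = (seg,) + rest
--             if all(l <= h for l, h in cube):
--                 out.append(cube)
--         deeper = [(core,) + p for p in go(i + 1)] if core[0] <= core[1] else []
--         return out + deeper
--
--     return go(0)
-- ===== Notes on version B (the rewrite author's own statement) =====
-- stated objective: alternative
-- what changed: B is structurally recursive over the axes: each level builds its two slabs directly from b's raw bounds (no line_int/None intersection pre-pass), filters them immediately against the suffix of full a-ranges, and prefixes the clipped core onto the recursively computed deeper pieces only when that core is non-empty, instead of A's six hand-unrolled appends followed by one final filter; on non-overlapping inputs (where A raises TypeError) B raises ValueError.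
import Mathlib
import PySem

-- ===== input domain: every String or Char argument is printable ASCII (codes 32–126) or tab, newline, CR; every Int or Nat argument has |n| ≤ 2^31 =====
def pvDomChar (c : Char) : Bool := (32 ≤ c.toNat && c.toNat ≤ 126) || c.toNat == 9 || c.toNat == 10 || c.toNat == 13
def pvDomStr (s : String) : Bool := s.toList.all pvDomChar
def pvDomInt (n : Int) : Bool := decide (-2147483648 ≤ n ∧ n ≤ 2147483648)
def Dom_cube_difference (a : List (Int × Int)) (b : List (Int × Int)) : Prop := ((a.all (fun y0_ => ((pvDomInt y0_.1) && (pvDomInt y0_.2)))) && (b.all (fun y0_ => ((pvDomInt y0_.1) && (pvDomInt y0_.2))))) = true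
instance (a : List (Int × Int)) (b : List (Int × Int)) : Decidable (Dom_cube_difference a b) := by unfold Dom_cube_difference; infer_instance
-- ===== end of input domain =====

-- B rebuilds the difference by structural recursion over the axes (raw-b cuts, fused filter,
-- core prefixed onto the deeper pieces); return-value equivalence on overlapping 3-axis inputs (Pre_).

-- ===== PORT A =====
-- None = Python None (subscripting it raises TypeError; those inputs are outside Pre_)
def line_int (a b : Int × Int) : Option (Int × Int) :=
  if b.1 > a.2 ∨ a.1 > b.2 then none
  else some (max a.1 b.1, min a.2 b.2)

def cube_difference (a : List (Int × Int)) (b : List (Int × Int)) : List (List (Int × Int)) :=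
  match PySem.List.pyGet? a 0, PySem.List.pyGet? a 1, PySem.List.pyGet? a 2,
        PySem.List.pyGet? b 0, PySem.List.pyGet? b 1, PySem.List.pyGet? b 2 with
  | some a0, some a1, some a2, some b0, some b1, some b2 =>
    match line_int a0 b0, line_int a1 b1, line_int a2 b2 with
    | some xint, some yint, some zint =>
      let cubes : List (List (Int × Int)) :=
        [ [(a0.1, xint.1 - 1), a1, a2],
          [(xint.2 + 1, a0.2), a1, a2],
          [xint, (a1.1, yint.1 - 1), a2],
          [xint, (yint.2 + 1, a1.2), a2],
          [xint, yint, (a2.1, zint.1 - 1)],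
          [xint, yint, (zint.2 + 1, a2.2)] ]
      cubes.filter (fun c => [0, 1, 2].all (fun n => decide ((c.getD n (0, 0)).1 ≤ (c.getD n (0, 0)).2)))
    | _, _, _ => []  -- a None intersection was subscripted: Python raises TypeError (outside Pre_)
  | _, _, _, _, _, _ => []  -- IndexError (outside Pre_)

-- ===== PORT B =====
def cd_go (a : List (Int × Int)) (b : List (Int × Int)) (i : Nat) : List (List (Int × Int)) :=
  if 3 ≤ i then []
  else
    let d : Int × Int := (0, 0)
    let ai := a.getD i d
    let bi := b.getD i d
    let core : Int × Int := (max ai.1 bi.1, min ai.2 bi.2)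
    let rest := ((List.range 3).drop (i + 1)).map (fun j => a.getD j d)
    let out := ([(ai.1, bi.1 - 1), (bi.2 + 1, ai.2)] : List (Int × Int)).foldl
      (fun acc seg =>
        let cube := seg :: rest
        if cube.all (fun p => decide (p.1 ≤ p.2)) then acc ++ [cube] else acc) []
    let deeper := if core.1 ≤ core.2 then (cd_go a b (i + 1)).map (fun p => core :: p) else []
    out ++ deeper
termination_by 3 - i

def cube_difference_alt (a : List (Int × Int)) (b : List (Int × Int)) : List (List (Int × Int)) :=
  let d : Int × Int := (0, 0)
  if ([0, 1, 2] : List Nat).any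
      (fun n => decide ((b.getD n d).1 > (a.getD n d).2 ∨ (a.getD n d).1 > (b.getD n d).2))
  then []  -- Python B raises ValueError here (outside Pre_)
  else cd_go a b 0

-- ===== PRECONDITION & SPEC =====
-- Pre_ excludes exactly the inputs where A raises: fewer than 3 axes (IndexError) or a
-- non-overlapping axis, where line_int returns None and A subscripts it (TypeError).
def Pre_cube_difference (a : List (Int × Int)) (b : List (Int × Int)) : Prop :=
  3 ≤ a.length ∧ 3 ≤ b.length ∧
  ∀ n ∈ [0, 1, 2], ¬((b.getD n (0, 0)).1 > (a.getD n (0, 0)).2 ∨ (a.getD n (0, 0)).1 > (b.getD n (0, 0)).2)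
instance (a : List (Int × Int)) (b : List (Int × Int)) : Decidable (Pre_cube_difference a b) := by unfold Pre_cube_difference; infer_instance

def pvWitness_cube_difference : (List (Int × Int)) × (List (Int × Int)) :=
  ([(0, 10), (0, 10), (0, 10)], [(2, 5), (-3, 4), (6, 20)])

def Spec_cube_difference (a : List (Int × Int)) (b : List (Int × Int)) (out : List (List (Int × Int))) : Prop := out = cube_difference_alt a b
instance (a : List (Int × Int)) (b : List (Int × Int)) (out : List (List (Int × Int))) : Decidable (Spec_cube_difference a b out) := by unfold Spec_cube_difference; infer_instance

-- ===== CLAIM (what is proved, stated in full; the proofs are below) =====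
def Claim_equal_cube_difference : Prop := ∀ (a : List (Int × Int)) (b : List (Int × Int)), Dom_cube_difference a b → Pre_cube_difference a b → Spec_cube_difference a b (cube_difference a b)

-- ===== LEMMAS AND PROOFS =====

def cdP (c : List (Int × Int)) : Bool := c.all (fun p => decide (p.1 ≤ p.2))

lemma cdFilter_map_cons (x : Int × Int) (L : List (List (Int × Int))) :
    List.filter cdP (L.map (fun t => x :: t))
      = if x.1 ≤ x.2 then (List.filter cdP L).map (fun t => x :: t) else [] := by
  induction L with
  | nil => simp
  | cons h t ih =>
    simp only [List.map_cons, List.filter_cons, ih]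
    have hcx : cdP (x :: h) = (decide (x.1 ≤ x.2) && cdP h) := by simp [cdP]
    rw [hcx]
    by_cases hx : x.1 ≤ x.2 <;> by_cases hh : cdP h = true <;>
      simp [hx, hh]

lemma cdFilter_low (al bl : Int) (rest : List (Int × Int)) :
    List.filter cdP [(al, max al bl - 1) :: rest]
      = List.filter cdP [(al, bl - 1) :: rest] := by
  by_cases h : al ≤ bl - 1
  · have hm : max al bl = bl := by omega
    simp [hm]
  · have h1 : ¬ (al ≤ max al bl - 1) := by omega
    simp [List.filter, cdP, h, h1]

lemma cdFilter_high (ah bh : Int) (rest : List (Int × Int)) :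
    List.filter cdP [(min ah bh + 1, ah) :: rest]
      = List.filter cdP [(bh + 1, ah) :: rest] := by
  by_cases h : bh + 1 ≤ ah
  · have hm : min ah bh = bh := by omega
    simp [hm]
  · have h1 : ¬ (min ah bh + 1 ≤ ah) := by omega
    simp [List.filter, cdP, h, h1]

lemma cdFilter_pair (al ah bl bh : Int) (rest : List (Int × Int)) :
    List.filter cdP [((al, max al bl - 1) :: rest), ((min ah bh + 1, ah) :: rest)]
      = List.filter cdP [((al, bl - 1) :: rest), ((bh + 1, ah) :: rest)] := by
  have hsplit : ∀ (u v : List (Int × Int)),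
      List.filter cdP [u, v] = List.filter cdP [u] ++ List.filter cdP [v] := by
    intro u v
    rw [show ([u, v] : List (List (Int × Int))) = [u] ++ [v] from rfl, List.filter_append]
  rw [hsplit, hsplit, cdFilter_low al bl rest, cdFilter_high ah bh rest]

-- ===== VERDICT (by name: the statement is the Claim_ definition above) =====
theorem cube_difference_spec : Claim_equal_cube_difference := by
  intro a b _ hpre
  obtain ⟨ha, hb, hov⟩ := hpre
  match a, b with
  | a0 :: a1 :: a2 :: ta, b0 :: b1 :: b2 :: tb =>
    have h0 := hov 0 (by simp)
    have h1 := hov 1 (by simp)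
    have h2 := hov 2 (by simp)
    simp only [List.getD, List.getElem?_cons_zero, List.getElem?_cons_succ, Option.getD_some] at h0 h1 h2
    have g0 : PySem.List.pyGet? (a0 :: a1 :: a2 :: ta) (0 : Int) = some a0 := by
      simp [PySem.List.pyGet?, PySem.List.pyIdx?]; split; · rfl
      · exfalso; omega
    have g1 : PySem.List.pyGet? (a0 :: a1 :: a2 :: ta) (1 : Int) = some a1 := by
      simp [PySem.List.pyGet?, PySem.List.pyIdx?]; split; · rfl
      · exfalso; omega
    have g2 : PySem.List.pyGet? (a0 :: a1 :: a2 :: ta) (2 : Int) = some a2 := by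
      simp [PySem.List.pyGet?, PySem.List.pyIdx?]; split; · rfl
      · exfalso; omega
    have g3 : PySem.List.pyGet? (b0 :: b1 :: b2 :: tb) (0 : Int) = some b0 := by
      simp [PySem.List.pyGet?, PySem.List.pyIdx?]; split; · rfl
      · exfalso; omega
    have g4 : PySem.List.pyGet? (b0 :: b1 :: b2 :: tb) (1 : Int) = some b1 := by
      simp [PySem.List.pyGet?, PySem.List.pyIdx?]; split; · rfl
      · exfalso; omega
    have g5 : PySem.List.pyGet? (b0 :: b1 :: b2 :: tb) (2 : Int) = some b2 := by
      simp [PySem.List.pyGet?, PySem.List.pyIdx?]; split; · rfl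
      · exfalso; omega
    show cube_difference _ _ = cube_difference_alt _ _
    simp only [cube_difference, cube_difference_alt, g0, g1, g2, g3, g4, g5, line_int,
               List.getD, if_neg h0, if_neg h1, if_neg h2]
    have hA : List.filter (fun c => [0, 1, 2].all fun n => decide (((getElem? c n).getD (0, 0)).1 ≤ ((getElem? c n).getD (0, 0)).2)) [[(a0.1, max a0.1 b0.1 - 1), a1, a2], [(min a0.2 b0.2 + 1, a0.2), a1, a2], [(max a0.1 b0.1, min a0.2 b0.2), (a1.1, max a1.1 b1.1 - 1), a2], [(max a0.1 b0.1, min a0.2 b0.2), (min a1.2 b1.2 + 1, a1.2), a2], [(max a0.1 b0.1, min a0.2 b0.2), (max a1.1 b1.1, min a1.2 b1.2), (a2.1, max a2.1 b2.1 - 1)], [(max a0.1 b0.1, min a0.2 b0.2), (max a1.1 b1.1, min a1.2 b1.2), (min a2.2 b2.2 + 1, a2.2)]] = List.filter cdP [[(a0.1, max a0.1 b0.1 - 1), a1, a2], [(min a0.2 b0.2 + 1, a0.2), a1, a2], [(max a0.1 b0.1, min a0.2 b0.2), (a1.1, max a1.1 b1.1 - 1), a2], [(max a0.1 b0.1, min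 a0.2 b0.2), (min a1.2 b1.2 + 1, a1.2), a2], [(max a0.1 b0.1, min a0.2 b0.2), (max a1.1 b1.1, min a1.2 b1.2), (a2.1, max a2.1 b2.1 - 1)], [(max a0.1 b0.1, min a0.2 b0.2), (max a1.1 b1.1, min a1.2 b1.2), (min a2.2 b2.2 + 1, a2.2)]] := List.filter_congr (by intro c hc; fin_cases hc <;> simp [cdP])
    refine hA.trans ?_
    rw [if_neg (by simp [h0, h1, h2])]
    have e3 : ∀ i, 3 ≤ i → cd_go (a0 :: a1 :: a2 :: ta) (b0 :: b1 :: b2 :: tb) i = [] := by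
      intro i hi; rw [cd_go]; simp [hi]
    have e2 : cd_go (a0 :: a1 :: a2 :: ta) (b0 :: b1 :: b2 :: tb) 2 =
        List.filter cdP [[(a2.1, b2.1 - 1)], [(b2.2 + 1, a2.2)]] := by
      rw [cd_go]
      simp only [List.getD, List.getElem?_cons_zero, List.getElem?_cons_succ, Option.getD_some]
      rw [e3 3 (by omega)]
      simp [cdP, List.range_succ, List.filter_cons]
      split_ifs <;> simp
    have e1 : cd_go (a0 :: a1 :: a2 :: ta) (b0 :: b1 :: b2 :: tb) 1 =
        List.filter cdP [[(a1.1, b1.1 - 1), a2], [(b1.2 + 1, a1.2), a2]] ++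
          (if max a1.1 b1.1 ≤ min a1.2 b1.2 then
            (List.filter cdP [[(a2.1, b2.1 - 1)], [(b2.2 + 1, a2.2)]]).map
              (fun t => (max a1.1 b1.1, min a1.2 b1.2) :: t)
          else []) := by
      rw [cd_go]
      simp only [List.getD, List.getElem?_cons_zero, List.getElem?_cons_succ, Option.getD_some]
      rw [e2]
      simp [cdP, List.range_succ, List.filter_cons]
      split_ifs <;> simp
    have e0 : cd_go (a0 :: a1 :: a2 :: ta) (b0 :: b1 :: b2 :: tb) 0 =
        List.filter cdP [[(a0.1, b0.1 - 1), a1, a2], [(b0.2 + 1, a0.2), a1, a2]] ++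
          (if max a0.1 b0.1 ≤ min a0.2 b0.2 then
            (List.filter cdP [[(a1.1, b1.1 - 1), a2], [(b1.2 + 1, a1.2), a2]] ++
              (if max a1.1 b1.1 ≤ min a1.2 b1.2 then
                (List.filter cdP [[(a2.1, b2.1 - 1)], [(b2.2 + 1, a2.2)]]).map
                  (fun t => (max a1.1 b1.1, min a1.2 b1.2) :: t)
              else [])).map (fun t => (max a0.1 b0.1, min a0.2 b0.2) :: t)
          else []) := by
      rw [cd_go]
      simp only [List.getD, List.getElem?_cons_zero, Option.getD_some]
      rw [e1]
      simp [cdP, List.range_succ, List.filter_cons]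
      split_ifs <;> simp
    rw [e0]
    rw [show ([[(a0.1, max a0.1 b0.1 - 1), a1, a2], [(min a0.2 b0.2 + 1, a0.2), a1, a2], [(max a0.1 b0.1, min a0.2 b0.2), (a1.1, max a1.1 b1.1 - 1), a2], [(max a0.1 b0.1, min a0.2 b0.2), (min a1.2 b1.2 + 1, a1.2), a2], [(max a0.1 b0.1, min a0.2 b0.2), (max a1.1 b1.1, min a1.2 b1.2), (a2.1, max a2.1 b2.1 - 1)], [(max a0.1 b0.1, min a0.2 b0.2), (max a1.1 b1.1, min a1.2 b1.2), (min a2.2 b2.2 + 1, a2.2)]] : List (List (Int × Int))) = [[(a0.1, max a0.1 b0.1 - 1), a1, a2], [(min a0.2 b0.2 + 1, a0.2), a1, a2]] ++ List.map (fun t => (max a0.1 b0.1, min a0.2 b0.2) :: t) ([[(a1.1, max a1.1 b1.1 - 1), a2], [(min a1.2 b1.2 + 1, a1.2), a2]] ++ List.map (fun t => (max a1.1 b1.1, min a1.2 b1.2) :: t) [[(a2.1, max a2.1 b2.1 - 1)], [(min a2.2 b2.2 + 1, a2.2)]]) from rfl]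
    rw [List.filter_append, cdFilter_map_cons, List.filter_append, cdFilter_map_cons]
    rw [cdFilter_pair a0.1 a0.2 b0.1 b0.2 [a1, a2], cdFilter_pair a1.1 a1.2 b1.1 b1.2 [a2],
        cdFilter_pair a2.1 a2.2 b2.1 b2.2 []]
  | [], _ => simp at ha
  | [_], _ => simp at ha
  | [_, _], _ => simp at ha
  | _ :: _ :: _ :: _, [] => simp at hb
  | _ :: _ :: _ :: _, [_] => simp at hb
  | _ :: _ :: _ :: _, [_, _] => simp at hb
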